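-- pv_equiv track=rewrite | github.com/d-j-e/SNPPar_test | code/processSeqGen.py | isVariable
-- ===== SOURCE A (Python) =====
-- def isVariable(calls):
-- 	test_call = calls[0]
-- 	counter = 1
-- 	while counter < len(calls):
-- 		if not(test_call == calls[counter]):
-- 			return True
-- 		counter += 1
-- 	return False
-- ===== SOURCE B (Python) =====
-- def isVariable(calls):
-- 	return calls.count(calls[0]) != len(calls)
-- ===== Notes on version B (the rewrite author's own statement) =====
-- stated objective: idiomatic
-- what changed: Replaced the indexed early-exit while loop with a single counting pass: count how many elements equal the first (list.count) and compare to the length.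
import Mathlib
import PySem

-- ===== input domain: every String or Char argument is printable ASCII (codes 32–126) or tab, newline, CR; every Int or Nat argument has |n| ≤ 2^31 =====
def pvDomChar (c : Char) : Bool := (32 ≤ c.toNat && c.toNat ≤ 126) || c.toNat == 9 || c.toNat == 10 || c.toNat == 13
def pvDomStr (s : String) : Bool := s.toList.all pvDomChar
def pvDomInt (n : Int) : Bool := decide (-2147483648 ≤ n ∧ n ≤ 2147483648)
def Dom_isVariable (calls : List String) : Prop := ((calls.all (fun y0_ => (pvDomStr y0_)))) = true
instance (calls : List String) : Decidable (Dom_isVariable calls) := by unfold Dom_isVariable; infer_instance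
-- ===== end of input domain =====

-- B replaces A's indexed early-exit while loop by one counting pass (count of first element vs length); idiomatic, same asymptotic cost.
-- ===== PORT A =====
-- while loop: compare each subsequent call to the first, early-return True on a mismatch
def isVariableLoopA (test_call : String) : List String → Bool
  | [] => false
  | c :: rest => if ¬ (test_call == c) then true else isVariableLoopA test_call rest

def isVariable (calls : List String) : Bool :=
  match calls with
  | [] => false  -- unreachable under Pre_: Python raises IndexError on calls[0]
  | test_call :: rest => isVariableLoopA test_call rest

-- ===== PORT B =====
def isVariable_alt (calls : List String) : Bool :=
  match calls with
  | [] => false  -- unreachable under Pre_: Python raises IndexError on calls[0]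
  | test_call :: _ => decide (PySem.List.count calls test_call ≠ calls.length)

-- ===== PRECONDITION & SPEC =====
-- Pre_ excludes only the empty list, on which Python A raises IndexError at calls[0] (B raises too).
def Pre_isVariable (calls : List String) : Prop := calls ≠ []
instance (calls : List String) : Decidable (Pre_isVariable calls) := by unfold Pre_isVariable; infer_instance
def pvWitness_isVariable : List String := (["A", "C"])
def Spec_isVariable (calls : List String) (out : Bool) : Prop := out = isVariable_alt calls
instance (calls : List String) (out : Bool) : Decidable (Spec_isVariable calls out) := by unfold Spec_isVariable; infer_instance

-- ===== CLAIM (what is proved, stated in full; the proofs are below) =====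
def Claim_equal_isVariable : Prop := ∀ (calls : List String), Dom_isVariable calls → Pre_isVariable calls → Spec_isVariable calls (isVariable calls)

-- ===== LEMMAS AND PROOFS =====

-- ===== VERDICT (by name: the statement is the Claim_ definition above) =====
lemma loopCount (t : String) (rest : List String) :
    isVariableLoopA t rest = decide (rest.count t ≠ rest.length) := by
  induction rest with
  | nil => simp [isVariableLoopA]
  | cons c cs ih =>
    by_cases h : t = c
    · subst h
      have : isVariableLoopA t (t :: cs) = isVariableLoopA t cs := by
        simp [isVariableLoopA]
      rw [this, ih, List.count_cons]
      simp
    · have hc : ¬ ((c : String) == t) = true := by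
        simp [BEq.beq]; exact fun e => h e.symm
      have hle : cs.count t ≤ cs.length := List.count_le_length
      simp [isVariableLoopA, h, List.count_cons, hc]
      omega

lemma countLen (t : String) (rest : List String) :
    isVariableLoopA t rest = decide (PySem.List.count (t :: rest) t ≠ (t :: rest).length) := by
  rw [loopCount]
  simp [PySem.List.count]

theorem isVariable_spec : Claim_equal_isVariable := by
  intro calls _ hpre
  unfold Spec_isVariable isVariable isVariable_alt
  match calls with
  | [] => exact absurd rfl hpre
  | t :: rest => exact countLen t rest
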